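-- pv_equiv track=rewrite | github.com/design4music/rai-companion | api_dispatcher.py | _extract_rai_sections
-- ===== SOURCE A (Python) =====
-- from typing import Dict, Optional, Tuple, Any, List
--
-- def _extract_rai_sections(content: str) -> Dict[str, str]:
--     """Extract RAI sections from LLM response"""
--
--     # Common section markers
--     section_markers = {
--         "fact_level": [
--             "**Fact-Level", "**FACT-LEVEL", "**FL-", "**Factual Analysis",
--             "## Fact-Level", "### Fact-Level", "# Fact-Level"
--         ],
--         "narrative_level": [
--             "**Narrative-Level", "**NARRATIVE-LEVEL", "**NL-", "**Narrative Analysis",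
--             "## Narrative-Level", "### Narrative-Level", "# Narrative-Level"
--         ],
--         "system_level": [
--             "**System-Level", "**SYSTEM-LEVEL", "**SL-", "**System Analysis",
--             "## System-Level", "### System-Level", "# System-Level"
--         ],
--         "final_synthesis": [
--             "**Final Synthesis", "**FINAL SYNTHESIS", "**Synthesis", "**Conclusion",
--             "## Final Synthesis", "### Final Synthesis", "# Final Synthesis"
--         ]
--     }
--
--     sections = {
--         "fact_level": "",
--         "narrative_level": "",
--         "system_level": "",
--         "final_synthesis": ""
--     }
--
--     lines = content.split('\n')
--     current_section = None
--     current_content = []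
--
--     for line in lines:
--         line_stripped = line.strip()
--
--         # Check if this line starts a new section
--         new_section = None
--         for section_name, markers in section_markers.items():
--             if any(marker in line for marker in markers):
--                 new_section = section_name
--                 break
--
--         if new_section:
--             # Save previous section
--             if current_section and current_content:
--                 sections[current_section] = '\n'.join(current_content).strip()
--
--             # Start new section
--             current_section = new_section
--             current_content = []
--         elif current_section:
--             # Add to current section
--             current_content.append(line)
--
--     # Save final section
--     if current_section and current_content:
--         sections[current_section] = '\n'.join(current_content).strip()
--
--     # If no structured sections found, try simpler fallback
--     if not any(sections.values()):
--         # Split by major headings or just use full content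
--         sections["final_synthesis"] = content.strip()
--
--     return sections
-- ===== SOURCE B (Python) =====
-- def _extract_rai_sections(content: str):
--     """Extract RAI sections from LLM response (chunk-based re-implementation)."""
--
--     section_markers = {
--         "fact_level": [
--             "**Fact-Level", "**FACT-LEVEL", "**FL-", "**Factual Analysis",
--             "## Fact-Level", "### Fact-Level", "# Fact-Level"
--         ],
--         "narrative_level": [
--             "**Narrative-Level", "**NARRATIVE-LEVEL", "**NL-", "**Narrative Analysis",
--             "## Narrative-Level", "### Narrative-Level", "# Narrative-Level"
--         ],
--         "system_level": [
--             "**System-Level", "**SYSTEM-LEVEL", "**SL-", "**System Analysis",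
--             "## System-Level", "### System-Level", "# System-Level"
--         ],
--         "final_synthesis": [
--             "**Final Synthesis", "**FINAL SYNTHESIS", "**Synthesis", "**Conclusion",
--             "## Final Synthesis", "### Final Synthesis", "# Final Synthesis"
--         ]
--     }
--
--     def classify(line):
--         for name, markers in section_markers.items():
--             if any(marker in line for marker in markers):
--                 return name
--         return None
--
--     sections = {name: "" for name in section_markers}
--
--     lines = content.split('\n')
--     n = len(lines)
--
--     # skip everything before the first marker line
--     i = 0
--     while i < n and classify(lines[i]) is None:
--         i += 1
--
--     # process chunks: a marker line followed by its block of non-marker lines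
--     while i < n:
--         name = classify(lines[i])
--         j = i + 1
--         while j < n and classify(lines[j]) is None:
--             j += 1
--         block = lines[i + 1:j]
--         if block:
--             sections[name] = '\n'.join(block).strip()
--         i = j
--
--     if not any(sections.values()):
--         sections["final_synthesis"] = content.strip()
--
--     return sections
-- ===== Notes on version B (the rewrite author's own statement) =====
-- stated objective: alternative
-- what changed: Replaced A's single-pass state machine carrying (current_section, current_content) accumulator state per line with a two-phase chunk decomposition: skip the prefix before the first marker, then repeatedly take a marker line plus the takeWhile-block of following non-marker lines and assign that slice to its section.
import Mathlib
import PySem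

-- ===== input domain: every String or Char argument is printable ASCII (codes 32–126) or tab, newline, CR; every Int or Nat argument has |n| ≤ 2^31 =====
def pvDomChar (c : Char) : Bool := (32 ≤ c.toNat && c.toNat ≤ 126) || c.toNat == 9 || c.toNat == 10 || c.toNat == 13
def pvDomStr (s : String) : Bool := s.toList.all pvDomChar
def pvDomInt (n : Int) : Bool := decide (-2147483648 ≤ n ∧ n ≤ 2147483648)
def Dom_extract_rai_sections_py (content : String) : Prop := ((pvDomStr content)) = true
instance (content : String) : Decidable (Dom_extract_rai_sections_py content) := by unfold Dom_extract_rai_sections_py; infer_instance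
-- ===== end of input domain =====

-- B re-implements A's line-by-line accumulator state machine as a two-phase chunk
-- decomposition (skip the prefix, then per chunk: marker line + takeWhile block); same results.

-- The marker table, shared verbatim by both Pythons.
def pvSectionMarkers : List (String × List String) :=
  [ ("fact_level",
      ["**Fact-Level", "**FACT-LEVEL", "**FL-", "**Factual Analysis",
       "## Fact-Level", "### Fact-Level", "# Fact-Level"]),
    ("narrative_level",
      ["**Narrative-Level", "**NARRATIVE-LEVEL", "**NL-", "**Narrative Analysis",
       "## Narrative-Level", "### Narrative-Level", "# Narrative-Level"]),
    ("system_level",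
      ["**System-Level", "**SYSTEM-LEVEL", "**SL-", "**System Analysis",
       "## System-Level", "### System-Level", "# System-Level"]),
    ("final_synthesis",
      ["**Final Synthesis", "**FINAL SYNTHESIS", "**Synthesis", "**Conclusion",
       "## Final Synthesis", "### Final Synthesis", "# Final Synthesis"]) ]

-- the identical scan both Pythons run on a line: first section (table order) with a marker `in` it
def pvClassify (line : String) : Option String :=
  pvSectionMarkers.foldl
    (fun acc p =>
      match acc with
      | some _ => acc
      | none => if p.2.any (fun m => PySem.Str.isIn m line) then some p.1 else none)
    none

-- ===== PORT A =====
-- the body of A's `for line in lines`, line for line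
-- (A also computes line.strip() into an unused variable; dropped as it has no effect)
def pvStepA (st : PySem.Dict String String × Option String × List String) (line : String) :
    PySem.Dict String String × Option String × List String :=
  let (sections, current_section, current_content) := st
  match pvClassify line with
  | some new_section =>
    let sections :=
      match current_section with
      | some cs =>
        if current_content.isEmpty then sections
        else sections.insert cs (PySem.Str.strip (PySem.Str.join "\n" current_content))
      | none => sections
    (sections, some new_section, ([] : List String))
  | none =>
    match current_section with
    | some _ => (sections, current_section, current_content ++ [line])
    | none => (sections, current_section, current_content)

-- A's trailing "save final section" block
def pvFinal (st : PySem.Dict String String × Option String × List String) :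
    PySem.Dict String String :=
  match st.2.1 with
  | some cs =>
    if st.2.2.isEmpty then st.1
    else st.1.insert cs (PySem.Str.strip (PySem.Str.join "\n" st.2.2))
  | none => st.1

def extract_rai_sections_py (content : String) : List (String × String) :=
  let sections0 : PySem.Dict String String :=
    PySem.Dict.ofList
      [("fact_level", ""), ("narrative_level", ""), ("system_level", ""), ("final_synthesis", "")]
  -- content.split('\n'): sep is the nonempty literal "\n", so split? is always `some` (exact)
  let lines := (PySem.Str.split? content "\n").getD []
  let st := lines.foldl pvStepA (sections0, none, [])
  let sections := pvFinal st
  let sections :=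
    if sections.values.any (fun v => v != "") then sections
    else sections.insert "final_synthesis" (PySem.Str.strip content)
  sections.items

-- ===== PORT B =====
-- B's outer while-loop: consume one chunk (marker line + its non-marker block) per call
def pvChunks (sections : PySem.Dict String String) (lines : List String) :
    PySem.Dict String String :=
  match lines with
  | [] => sections
  | m :: rest =>
    let block := rest.takeWhile (fun l => (pvClassify l).isNone)
    let rest' := rest.dropWhile (fun l => (pvClassify l).isNone)
    let sections :=
      match pvClassify m with
      | some name =>
        if block.isEmpty then sections
        else sections.insert name (PySem.Str.strip (PySem.Str.join "\n" block))
      | none => sections  -- unreachable: pvChunks is only fed lists headed by a marker line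
    pvChunks sections rest'
termination_by lines.length
decreasing_by
  exact Nat.lt_succ_of_le (List.length_dropWhile_le _ _)

def extract_rai_sections_py_alt (content : String) : List (String × String) :=
  let sections0 : PySem.Dict String String :=
    PySem.Dict.ofList (pvSectionMarkers.map (fun p => (p.1, "")))
  -- content.split('\n'): sep is the nonempty literal "\n", so split? is always `some` (exact)
  let lines := (PySem.Str.split? content "\n").getD []
  let body := lines.dropWhile (fun l => (pvClassify l).isNone)   -- skip prefix before first marker
  let sections := pvChunks sections0 body
  let sections :=
    if sections.values.any (fun v => v != "") then sections
    else sections.insert "final_synthesis" (PySem.Str.strip content)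
  sections.items

-- ===== PRECONDITION & SPEC =====
def Spec_extract_rai_sections_py (content : String) (out : List (String × String)) : Prop := out = extract_rai_sections_py_alt content
instance (content : String) (out : List (String × String)) : Decidable (Spec_extract_rai_sections_py content out) := by unfold Spec_extract_rai_sections_py; infer_instance

-- ===== CLAIM (what is proved, stated in full; the proofs are below) =====
def Claim_equal_extract_rai_sections_py : Prop := ∀ (content : String), Dom_extract_rai_sections_py content → Spec_extract_rai_sections_py content (extract_rai_sections_py content)

-- ===== LEMMAS AND PROOFS =====

theorem pvChunks_nil (d : PySem.Dict String String) : pvChunks d [] = d := by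
  unfold pvChunks
  rfl

theorem pvChunks_cons (d : PySem.Dict String String) (m : String) (rest : List String) :
    pvChunks d (m :: rest) =
      pvChunks
        (match pvClassify m with
         | some name =>
           if (rest.takeWhile (fun l => (pvClassify l).isNone)).isEmpty then d
           else d.insert name
             (PySem.Str.strip (PySem.Str.join "\n" (rest.takeWhile (fun l => (pvClassify l).isNone))))
         | none => d)
        (rest.dropWhile (fun l => (pvClassify l).isNone)) := by
  conv_lhs => unfold pvChunks

def pvFlush (d : PySem.Dict String String) (s : String) (acc : List String) :
    PySem.Dict String String :=
  if acc.isEmpty then d else d.insert s (PySem.Str.strip (PySem.Str.join "\n" acc))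

theorem pvFold_some (lines : List String) : ∀ (d : PySem.Dict String String) (s : String)
    (acc : List String),
    pvFinal (lines.foldl pvStepA (d, some s, acc)) =
      pvChunks (pvFlush d s (acc ++ lines.takeWhile (fun l => (pvClassify l).isNone)))
        (lines.dropWhile (fun l => (pvClassify l).isNone)) := by
  induction lines with
  | nil =>
    intro d s acc
    simp [pvFinal, pvFlush, pvChunks_nil]
  | cons l rest ih =>
    intro d s acc
    cases hc : pvClassify l with
    | none =>
      have hstep : pvStepA (d, some s, acc) l = (d, some s, acc ++ [l]) := by
        simp [pvStepA, hc]
      simp only [List.foldl_cons, List.takeWhile_cons, List.dropWhile_cons, hc,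
        Option.isNone_none, if_true, hstep, ih]
      simp
    | some nm =>
      have hstep : pvStepA (d, some s, acc) l = (pvFlush d s acc, some nm, []) := by
        simp [pvStepA, pvFlush, hc]
      simp only [List.foldl_cons, List.takeWhile_cons, List.dropWhile_cons, hc,
        Option.isNone_some, Bool.false_eq_true, if_false, hstep, ih]
      rw [pvChunks_cons]
      simp [hc, pvFlush]

theorem pvFold_none (lines : List String) : ∀ (d : PySem.Dict String String),
    pvFinal (lines.foldl pvStepA (d, none, [])) =
      pvChunks d (lines.dropWhile (fun l => (pvClassify l).isNone)) := by
  induction lines with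
  | nil => intro d; simp [pvFinal, pvChunks_nil]
  | cons l rest ih =>
    intro d
    cases hc : pvClassify l with
    | none =>
      have hstep : pvStepA (d, none, []) l = (d, none, []) := by
        simp [pvStepA, hc]
      simp only [List.foldl_cons, List.dropWhile_cons, hc, Option.isNone_none, if_true, hstep, ih]
    | some nm =>
      have hstep : pvStepA (d, none, []) l = (d, some nm, []) := by
        simp [pvStepA, hc]
      simp only [List.foldl_cons, List.dropWhile_cons, hc, Option.isNone_some, Bool.false_eq_true,
        if_false, hstep, pvFold_some]
      rw [pvChunks_cons]
      simp [hc, pvFlush]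

-- the two initial dicts are the same value
theorem pvInit_eq :
    (PySem.Dict.ofList
      [("fact_level", ""), ("narrative_level", ""), ("system_level", ""), ("final_synthesis", "")]
      : PySem.Dict String String) =
    PySem.Dict.ofList (pvSectionMarkers.map (fun p => (p.1, ""))) := by
  decide

-- ===== VERDICT (by name: the statement is the Claim_ definition above) =====
theorem extract_rai_sections_py_spec : Claim_equal_extract_rai_sections_py := by
  intro content _
  unfold Spec_extract_rai_sections_py extract_rai_sections_py extract_rai_sections_py_alt
  simp only [pvFold_none, pvInit_eq]
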